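-- pv_equiv track=rewrite | github.com/tchindebebruno/AdventOfCodeAI | sol2.py | compress_zeros
-- ===== SOURCE A (Python) =====
-- from typing import List, Tuple, Set, FrozenSet, Optional, Dict
--
-- def compress_zeros(targets: List[int], buttons: List[FrozenSet[int]]) -> Tuple[List[int], List[FrozenSet[int]]]:
--     # Supprime compteurs déjà satisfaits (0) et remappe les boutons
--     active_idx = [i for i, v in enumerate(targets) if v > 0]
--     if len(active_idx) == len(targets):
--         return targets, buttons
--     idx_map = {old: new for new, old in enumerate(active_idx)}
--     new_targets = [targets[i] for i in active_idx]
--     new_buttons = []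
--     for s in buttons:
--         ns = frozenset(idx_map[i] for i in s if i in idx_map)
--         new_buttons.append(ns)
--     return new_targets, new_buttons
-- ===== SOURCE B (Python) =====
-- def compress_zeros(targets, buttons):
--     # Repeated single-counter deletion: instead of building an old->new index map,
--     # delete each satisfied counter one at a time (back to front), decrementing the
--     # larger button indices at each deletion. References to out-of-range or already
--     # satisfied counters are dropped up front.
--     if all(v > 0 for v in targets):
--         return targets, buttons
--     n = len(targets)
--     tgt = list(targets)
--     btns = [[i for i in s if 0 <= i < n and targets[i] > 0] for s in buttons]
--     for k in range(n - 1, -1, -1):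
--         if tgt[k] <= 0:
--             del tgt[k]
--             btns = [[i - 1 if i > k else i for i in b] for b in btns]
--     return tgt, [frozenset(b) for b in btns]
-- ===== Notes on version B (the rewrite author's own statement) =====
-- stated objective: alternative
-- what changed: B never builds an old-to-new index map: after dropping references to satisfied or out-of-range counters, it removes the satisfied counters one at a time back to front, decrementing every button index larger than the deleted position at each deletion, so the active-index list and the dict disappear in favour of repeated single-deletion passes.
import Mathlib
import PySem

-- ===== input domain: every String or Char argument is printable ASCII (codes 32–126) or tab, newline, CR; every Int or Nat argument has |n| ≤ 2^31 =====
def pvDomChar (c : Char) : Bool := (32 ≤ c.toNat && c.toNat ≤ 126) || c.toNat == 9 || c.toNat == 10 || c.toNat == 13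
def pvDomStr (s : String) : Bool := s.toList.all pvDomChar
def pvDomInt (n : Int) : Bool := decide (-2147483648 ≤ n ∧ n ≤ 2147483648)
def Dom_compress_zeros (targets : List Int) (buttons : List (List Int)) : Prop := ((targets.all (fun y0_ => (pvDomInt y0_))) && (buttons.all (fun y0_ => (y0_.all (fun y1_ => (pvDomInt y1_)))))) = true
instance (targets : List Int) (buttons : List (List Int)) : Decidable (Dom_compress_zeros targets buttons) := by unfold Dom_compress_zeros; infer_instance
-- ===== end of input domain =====

-- B removes satisfied counters one deletion at a time (back to front), decrementing larger
-- button indices per deletion, instead of building A's old->new index map (alternative, not faster).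

-- ===== PORT A =====
-- active_idx = [i for i, v in enumerate(targets) if v > 0]
-- idx_map = {old: new for new, old in enumerate(active_idx)}  (a dict comprehension = fold of insert)
def compress_zeros (targets : List Int) (buttons : List (List Int)) : List Int × List (List Int) :=
  let active_idx : List Int :=
    (PySem.List.enumerate targets).filterMap (fun p => if p.2 > 0 then some p.1 else none)
  if active_idx.length = targets.length then (targets, buttons)
  else
    let idx_map : PySem.Dict Int Int :=
      (PySem.List.enumerate active_idx).foldl (fun d p => d.insert p.2 p.1) PySem.Dict.empty
    let new_targets : List Int := active_idx.map (fun i => (PySem.List.pyGet? targets i).getD 0)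
    -- (every i in active_idx is in range, so pyGet? is some; getD 0 only totalizes)
    let new_buttons : List (List Int) :=
      buttons.map (fun s => PySem.Set.ofList (s.filterMap (fun i => idx_map.get? i)))
    (new_targets, new_buttons)

-- ===== PORT B =====
-- the filter test '0 <= i < n and targets[i] > 0' of Source B (getD 0 only totalizes: the guard keeps i in range)
def okB (targets : List Int) (i : Int) : Bool :=
  decide (0 ≤ i) && decide (i < (targets.length : Int)) && decide (0 < (PySem.List.pyGet? targets i).getD 0)

-- one iteration of the for-loop body: 'if tgt[k] <= 0: del tgt[k]; btns = [[i-1 if i>k else i ...]]'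
-- ('del tgt[k]' is ported by hand as tgt[:k] + tgt[k+1:], exact for the in-range k the loop uses)
def delShiftB (st : List Int × List (List Int)) (k : Int) : List Int × List (List Int) :=
  if (PySem.List.pyGet? st.1 k).getD 0 ≤ 0 then
    (PySem.List.slice st.1 none (some k) ++ PySem.List.slice st.1 (some (k + 1)) none,
     st.2.map (fun b => b.map (fun i => if k < i then i - 1 else i)))
  else st

-- 'for k in range(n-1, -1, -1): …'  (processes k = n-1, …, 0)
def downForB : Nat → List Int × List (List Int) → List Int × List (List Int)
  | 0, st => st
  | k + 1, st => downForB k (delShiftB st (k : Int))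

def compress_zeros_alt (targets : List Int) (buttons : List (List Int)) : List Int × List (List Int) :=
  if targets.all (fun v => 0 < v) then (targets, buttons)
  else
    let btns0 : List (List Int) := buttons.map (fun s => s.filter (okB targets))
    let st := downForB targets.length (targets, btns0)
    (st.1, st.2.map (fun b => PySem.Set.ofList b))

-- ===== PRECONDITION & SPEC =====
def Spec_compress_zeros (targets : List Int) (buttons : List (List Int)) (out : List Int × List (List Int)) : Prop := out = compress_zeros_alt targets buttons
instance (targets : List Int) (buttons : List (List Int)) (out : List Int × List (List Int)) : Decidable (Spec_compress_zeros targets buttons out) := by unfold Spec_compress_zeros; infer_instance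

-- ===== CLAIM (what is proved, stated in full; the proofs are below) =====
def Claim_equal_compress_zeros : Prop := ∀ (targets : List Int) (buttons : List (List Int)), Dom_compress_zeros targets buttons → Spec_compress_zeros targets buttons (compress_zeros targets buttons)

-- ===== LEMMAS AND PROOFS =====

-- indices a, a+1, … of the positive entries of ts
def posIdx (a : Int) : List Int → List Int
  | [] => []
  | v :: ts => if 0 < v then a :: posIdx (a + 1) ts else posIdx (a + 1) ts

-- the value idx_map gives to x, computed structurally over ts
def rankB (a b x : Int) : List Int → Option Int
  | [] => none
  | v :: ts =>
    if 0 < v then (if x = a then some b else rankB (a + 1) (b + 1) x ts)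
    else rankB (a + 1) b x ts

def nonposCnt (ts : List Int) : Int := ((ts.filter (fun v => v ≤ 0)).length : Int)

-- B's remap of an original index i after the deletions at positions ≥ k have been done
def sigmaF (targets : List Int) (k : Nat) (i : Int) : Int :=
  if (k : Int) ≤ i then i - nonposCnt ((targets.drop k).take (i.toNat - k)) else i

theorem enum_filterMap_posIdx (ts : List Int) (a : Int) :
    (PySem.List.enumerate ts a).filterMap (fun p => if p.2 > 0 then some p.1 else none)
      = posIdx a ts := by
  induction ts generalizing a with
  | nil => simp [posIdx, PySem.List.enumerate_nil]
  | cons v ts ih =>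
    simp only [PySem.List.enumerate_cons, posIdx, List.filterMap_cons]
    by_cases hv : 0 < v
    · simp only [if_pos hv, ih]
    · simp only [if_neg hv, ih]

theorem length_posIdx (ts : List Int) (a : Int) :
    (posIdx a ts).length = (ts.filter (fun v => 0 < v)).length := by
  induction ts generalizing a with
  | nil => rfl
  | cons v ts ih =>
    simp only [posIdx, List.filter_cons]
    by_cases hv : 0 < v
    · simp [hv, ih]
    · simp [hv, ih]

theorem rankB_none_of_lt (ts : List Int) (a b x : Int) (h : x < a) : rankB a b x ts = none := by
  induction ts generalizing a b with
  | nil => rfl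
  | cons v ts ih =>
    simp only [rankB]
    split
    · rw [if_neg (by omega), ih _ _ (by omega)]
    · exact ih _ _ (by omega)

theorem rankB_none_of_ge (ts : List Int) (a b x : Int) (h : a + ts.length ≤ x) :
    rankB a b x ts = none := by
  induction ts generalizing a b with
  | nil => rfl
  | cons v ts ih =>
    simp only [rankB, List.length_cons] at *
    split
    · rw [if_neg (by push_cast at h ⊢; omega), ih _ _ (by push_cast at h ⊢; omega)]
    · exact ih _ _ (by push_cast at h ⊢; omega)

-- get? of the fold of inserts, when keys are distinct: first (= only) matching pair
theorem get?_foldl_insert (l : List (Int × Int)) (d : PySem.Dict Int Int) (x : Int)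
    (hnd : (l.map (·.2)).Nodup) :
    (l.foldl (fun d p => d.insert p.2 p.1) d).get? x
      = match l.find? (fun p => p.2 = x) with
        | some p => some p.1
        | none => d.get? x := by
  induction l generalizing d with
  | nil => rfl
  | cons e l ih =>
    simp only [List.map_cons, List.nodup_cons] at hnd
    simp only [List.foldl_cons, List.find?_cons]
    rw [ih _ hnd.2]
    by_cases hx : e.2 = x
    · subst hx
      have hnone : l.find? (fun p => decide (p.2 = e.2)) = none := by
        rw [List.find?_eq_none]
        intro p hp hdec
        have hpe : p.2 = e.2 := by simpa using hdec
        exact hnd.1 (List.mem_map.mpr ⟨p, hp, hpe⟩)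
      rw [hnone, show decide (e.2 = e.2) = true from by simp]
      simp [PySem.Dict.get?_insert_self]
    · rw [show decide (e.2 = x) = false from decide_eq_false hx]
      cases hfind : l.find? (fun p => decide (p.2 = x)) with
      | some p => simp
      | none => simp [PySem.Dict.get?_insert, hx, Ne.symm hx]

theorem mem_posIdx_le (ts : List Int) (a : Int) : ∀ x ∈ posIdx a ts, a ≤ x := by
  induction ts generalizing a with
  | nil => intro x hx; simp [posIdx] at hx
  | cons v ts ih =>
    intro x hx
    simp only [posIdx] at hx
    split at hx
    · rcases List.mem_cons.mp hx with h | h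
      · omega
      · have := ih _ _ h; omega
    · have := ih _ _ hx; omega

theorem find?_enum_posIdx (ts : List Int) (a b x : Int) :
    (PySem.List.enumerate (posIdx a ts) b).find? (fun p => p.2 = x)
      = (rankB a b x ts).map (fun v => (v, x)) := by
  induction ts generalizing a b with
  | nil => rfl
  | cons v ts ih =>
    simp only [posIdx, rankB]
    split
    · simp only [PySem.List.enumerate_cons, List.find?_cons]
      by_cases hx : x = a
      · subst hx; simp
      · rw [show decide (a = x) = false from decide_eq_false (fun h => hx h.symm), ih, if_neg hx]
    · exact ih _ _

theorem posIdx_pairwise (ts : List Int) (a : Int) : (posIdx a ts).Pairwise (· < ·) := by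
  induction ts generalizing a with
  | nil => exact List.Pairwise.nil
  | cons v ts ih =>
    simp only [posIdx]
    split
    · exact List.Pairwise.cons (fun x hx => by have := mem_posIdx_le ts (a+1) x hx; omega) (ih _)
    · exact ih _

theorem nodup_posIdx (ts : List Int) (a : Int) : (posIdx a ts).Nodup :=
  (posIdx_pairwise ts a).imp (fun h => ne_of_lt h)

theorem nonposCnt_cons (v : Int) (l : List Int) :
    nonposCnt (v :: l) = (if v ≤ 0 then 1 else 0) + nonposCnt l := by
  by_cases hv : v ≤ 0 <;> simp [nonposCnt, List.filter_cons, hv] <;> push_cast <;> ring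

theorem nonposCnt_le_length (l : List Int) : nonposCnt l ≤ (l.length : Int) := by
  simp only [nonposCnt, Nat.cast_le]
  exact List.length_filter_le _ _

theorem rankB_pos (ts : List Int) (a b : Int) (k : Nat) (hk : k < ts.length)
    (hpos : 0 < ts[k]) :
    rankB a b (a + k) ts = some (b + (k : Int) - nonposCnt (ts.take k)) := by
  induction ts generalizing a b k with
  | nil => simp at hk
  | cons v ts ih =>
    cases k with
    | zero =>
      simp only [List.getElem_cons_zero] at hpos
      simp [rankB, hpos, nonposCnt]
    | succ k =>
      simp only [List.getElem_cons_succ] at hpos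
      have hk' : k < ts.length := by simpa using hk
      simp only [rankB, List.take_succ_cons]
      have harg : a + ((k + 1 : Nat) : Int) = (a + 1) + (k : Int) := by push_cast; ring
      by_cases hv : 0 < v
      · rw [if_pos hv, if_neg (by push_cast; omega), harg, ih _ _ k hk' hpos, nonposCnt_cons,
          if_neg (by omega : ¬ v ≤ 0)]
        congr 1; push_cast; ring
      · rw [if_neg hv, harg, ih _ _ k hk' hpos, nonposCnt_cons, if_pos (by omega : v ≤ 0)]
        congr 1; push_cast; ring

theorem rankB_nonpos (ts : List Int) (a b : Int) (k : Nat) (hk : k < ts.length)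
    (hnp : ts[k] ≤ 0) : rankB a b (a + k) ts = none := by
  induction ts generalizing a b k with
  | nil => simp at hk
  | cons v ts ih =>
    cases k with
    | zero =>
      simp only [List.getElem_cons_zero] at hnp
      simp only [rankB]
      rw [if_neg (by omega)]
      exact rankB_none_of_lt _ _ _ _ (by push_cast; omega)
    | succ k =>
      simp only [List.getElem_cons_succ] at hnp
      have hk' : k < ts.length := by simpa using hk
      have harg : a + ((k + 1 : Nat) : Int) = (a + 1) + (k : Int) := by push_cast; ring
      simp only [rankB]
      by_cases hv : 0 < v
      · rw [if_pos hv, if_neg (by push_cast; omega), harg]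
        exact ih _ _ k hk' hnp
      · rw [if_neg hv, harg]
        exact ih _ _ k hk' hnp

theorem filter_pos_length_eq_iff_all (ts : List Int) :
    (ts.filter (fun v => 0 < v)).length = ts.length ↔ ts.all (fun v => 0 < v) = true := by
  induction ts with
  | nil => simp
  | cons v ts ih =>
    have hle := List.length_filter_le (fun v => decide (0 < v)) ts
    simp only [List.filter_cons, List.all_cons, Bool.and_eq_true, decide_eq_true_eq]
    by_cases hv : 0 < v
    · simpa [hv] using ih
    · simp only [if_neg hv, List.length_cons]
      constructor
      · intro h; omega
      · rintro ⟨h, -⟩; exact absurd h hv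

-- the dict lookup of port A equals the rank arithmetic, pointwise
theorem dict_eq_rank (targets : List Int) (x : Int) :
    ((PySem.List.enumerate (posIdx 0 targets)).foldl (fun d p => d.insert p.2 p.1)
        PySem.Dict.empty).get? x
      = if okB targets x then some (x - nonposCnt (targets.take x.toNat)) else none := by
  have hnd : ((PySem.List.enumerate (posIdx 0 targets)).map (·.2)).Nodup := by
    rw [PySem.List.map_snd_enumerate]; exact nodup_posIdx _ _
  rw [get?_foldl_insert _ _ _ hnd, find?_enum_posIdx]
  have hrk : (match (rankB 0 0 x targets).map (fun v => (v, x)) with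
      | some p => some p.1
      | none => (PySem.Dict.empty : PySem.Dict Int Int).get? x) = rankB 0 0 x targets := by
    cases rankB 0 0 x targets <;> simp [PySem.Dict.get?_empty]
  rw [hrk]
  by_cases h0 : 0 ≤ x
  · by_cases hlen : x < (targets.length : Int)
    · have hklt : x.toNat < targets.length := by omega
      have hget : PySem.List.pyGet? targets x = some targets[x.toNat] := by
        rw [PySem.List.pyGet?_of_nonneg _ h0, List.getElem?_eq_getElem hklt]
      by_cases hpos : 0 < targets[x.toNat]
      · rw [if_pos (by
          simp only [okB, hget, Option.getD_some, Bool.and_eq_true, decide_eq_true_eq]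
          exact ⟨⟨h0, hlen⟩, hpos⟩)]
        have := rankB_pos targets 0 0 x.toNat hklt hpos
        rw [show (0 : Int) + (x.toNat : Int) = x by omega] at this
        rw [this]
      · rw [if_neg (by
          simp only [okB, hget, Option.getD_some, Bool.and_eq_true, decide_eq_true_eq]
          rintro ⟨-, hc⟩
          omega)]
        have := rankB_nonpos targets 0 0 x.toNat hklt (by omega)
        rw [show (0 : Int) + (x.toNat : Int) = x by omega] at this
        exact this
    · rw [if_neg (by simp [okB]; intro _ h; omega),
        rankB_none_of_ge _ _ _ _ (by push_cast; omega)]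
  · rw [if_neg (by simp [okB]; intro h; omega), rankB_none_of_lt _ _ _ _ (by omega)]

-- A's new_targets equals the positive filter
theorem posIdx_map_get (full : List Int) :
    ∀ (ts : List Int) (a : Nat), full.drop a = ts →
      (posIdx (a : Int) ts).map (fun i => (PySem.List.pyGet? full i).getD 0)
        = ts.filter (fun v => 0 < v) := by
  intro ts
  induction ts with
  | nil => intro a _; rfl
  | cons v ts ih =>
    intro a hdrop
    have hget : full[a]? = some v := by
      have : (full.drop a)[0]? = some v := by rw [hdrop]; rfl
      rwa [List.getElem?_drop, Nat.add_zero] at this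
    have hdrop' : full.drop (a + 1) = ts := by
      have : (full.drop a).drop 1 = ts := by rw [hdrop]; rfl
      rwa [List.drop_drop] at this
    have hcast : ((a : Nat) : Int) + 1 = (((a + 1 : Nat)) : Int) := by push_cast; ring
    simp only [posIdx, List.filter_cons]
    by_cases hv : 0 < v
    · rw [if_pos hv, if_pos (by simpa using hv)]
      simp only [List.map_cons, PySem.List.pyGet?_natCast, hget, Option.getD_some]
      rw [hcast, ih (a + 1) hdrop']
    · rw [if_neg hv, if_neg (by simpa using hv)]
      rw [hcast]
      exact ih (a + 1) hdrop'

-- unpack okB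
theorem okB_iff (targets : List Int) (i : Int) :
    okB targets i = true ↔
      0 ≤ i ∧ i.toNat < targets.length ∧ ∃ h : i.toNat < targets.length, 0 < targets[i.toNat] := by
  simp only [okB, Bool.and_eq_true, decide_eq_true_eq]
  constructor
  · rintro ⟨⟨h0, hlt⟩, hpos⟩
    have hklt : i.toNat < targets.length := by omega
    rw [PySem.List.pyGet?_of_nonneg _ h0, List.getElem?_eq_getElem hklt] at hpos
    exact ⟨h0, hklt, hklt, by simpa using hpos⟩
  · rintro ⟨h0, hklt, _, hpos⟩
    refine ⟨⟨h0, by omega⟩, ?_⟩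
    rw [PySem.List.pyGet?_of_nonneg _ h0, List.getElem?_eq_getElem hklt]
    simpa using hpos

theorem filterMap_guard (f : Int → Int) (q : Int → Bool) (l : List Int) :
    l.filterMap (fun i => if q i then some (f i) else none) = (l.filter q).map f := by
  induction l with
  | nil => rfl
  | cons x l ih =>
    simp only [List.filterMap_cons, List.filter_cons]
    by_cases hx : q x = true
    · simp [hx, ih]
    · simp [hx, ih]

theorem sigmaF_top (targets : List Int) (i : Int) (h : okB targets i = true) :
    sigmaF targets targets.length i = i := by
  obtain ⟨h0, hklt, -⟩ := (okB_iff targets i).mp h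
  simp only [sigmaF]
  rw [if_neg (by omega)]

theorem sigmaF_zero (targets : List Int) (i : Int) (h0 : 0 ≤ i) :
    sigmaF targets 0 i = i - nonposCnt (targets.take i.toNat) := by
  simp only [sigmaF, List.drop_zero, Nat.sub_zero, Nat.cast_zero]
  rw [if_pos h0]

theorem sigmaF_step_pos (targets : List Int) (k : Nat) (i : Int)
    (hk : k < targets.length) (hpos : 0 < targets[k]) (h0 : 0 ≤ i) :
    sigmaF targets (k + 1) i = sigmaF targets k i := by
  simp only [sigmaF]
  by_cases hik : (k : Int) + 1 ≤ i
  · rw [if_pos (by push_cast; omega), if_pos (by omega)]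
    have hdk : targets.drop k = targets[k] :: targets.drop (k + 1) :=
      List.drop_eq_getElem_cons hk
    have hm : i.toNat - k = (i.toNat - (k + 1)) + 1 := by omega
    rw [hdk, hm, List.take_succ_cons, nonposCnt_cons, if_neg (by omega)]
    ring_nf
  · by_cases hik2 : (k : Int) ≤ i
    · have hieq : i = (k : Int) := by omega
      rw [if_neg (by push_cast; omega), if_pos hik2]
      have : i.toNat - k = 0 := by omega
      rw [this]
      simp [nonposCnt]
    · rw [if_neg (by push_cast; omega), if_neg hik2]

theorem sigmaF_step_nonpos (targets : List Int) (k : Nat) (i : Int)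
    (hk : k < targets.length) (hneg : targets[k] ≤ 0) (h : okB targets i = true) :
    (if (k : Int) < sigmaF targets (k + 1) i then sigmaF targets (k + 1) i - 1
     else sigmaF targets (k + 1) i) = sigmaF targets k i := by
  obtain ⟨h0, hklt, hw, hpos⟩ := (okB_iff targets i).mp h
  have hik : i.toNat ≠ k := by
    intro hEq; simp only [hEq] at hpos; omega
  simp only [sigmaF]
  by_cases hgt : (k : Int) + 1 ≤ i
  · have hdk : targets.drop k = targets[k] :: targets.drop (k + 1) :=
      List.drop_eq_getElem_cons hk
    have hm : i.toNat - k = (i.toNat - (k + 1)) + 1 := by omega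
    have hc1 : nonposCnt ((targets.drop k).take (i.toNat - k))
        = 1 + nonposCnt ((targets.drop (k + 1)).take (i.toNat - (k + 1))) := by
      rw [hdk, hm, List.take_succ_cons, nonposCnt_cons, if_pos hneg]
    have hbound : nonposCnt ((targets.drop (k + 1)).take (i.toNat - (k + 1)))
        ≤ ((i.toNat - (k + 1) : Nat) : Int) := by
      calc nonposCnt ((targets.drop (k + 1)).take (i.toNat - (k + 1)))
          ≤ (((targets.drop (k + 1)).take (i.toNat - (k + 1))).length : Int) :=
            nonposCnt_le_length _
        _ ≤ ((i.toNat - (k + 1) : Nat) : Int) := by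
            simp [List.length_take]
    rw [if_pos (by push_cast; omega), if_pos (by omega),
      if_pos (by push_cast at hbound ⊢; omega), hc1]
    ring_nf
  · have hlt : i < (k : Int) := by
      rcases lt_or_ge i (k : Int) with h' | h'
      · exact h'
      · exact absurd (by omega : i = (k : Int)) (by omega)
    rw [if_neg (by push_cast; omega), if_neg (by omega), if_neg (by omega)]

theorem downForB_inv (targets : List Int) (k : Nat) (hk : k ≤ targets.length)
    (bs : List (List Int)) (hbs : ∀ b ∈ bs, ∀ i ∈ b, okB targets i = true) :
    downForB k (targets.take k ++ (targets.drop k).filter (fun v => 0 < v),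
                bs.map (fun b => b.map (sigmaF targets k)))
      = (targets.filter (fun v => 0 < v), bs.map (fun b => b.map (sigmaF targets 0))) := by
  induction k with
  | zero => simp [downForB]
  | succ k ih =>
    have hklt : k < targets.length := by omega
    have hlen : (targets.take (k + 1)).length = k + 1 := by
      simp [List.length_take]; omega
    have hdk : targets.drop k = targets[k] :: targets.drop (k + 1) :=
      List.drop_eq_getElem_cons hklt
    have hget : PySem.List.pyGet?
        (targets.take (k + 1) ++ (targets.drop (k + 1)).filter (fun v => 0 < v)) (k : Int)
        = some targets[k] := by
      rw [PySem.List.pyGet?_natCast, List.getElem?_append_left (by omega),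
        List.getElem?_take_of_lt (by omega), List.getElem?_eq_getElem hklt]
    simp only [downForB, delShiftB, hget, Option.getD_some]
    by_cases hneg : targets[k] ≤ 0
    · rw [if_pos hneg]
      have hs1 : PySem.List.slice
          (targets.take (k + 1) ++ (targets.drop (k + 1)).filter (fun v => 0 < v))
          none (some (k : Int)) = targets.take k := by
        rw [PySem.List.slice_to_natCast, List.take_append_of_le_length (by rw [hlen]; omega),
          List.take_take, show min k (k + 1) = k by omega]
      have hs2 : PySem.List.slice
          (targets.take (k + 1) ++ (targets.drop (k + 1)).filter (fun v => 0 < v))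
          (some ((k : Int) + 1)) none = (targets.drop (k + 1)).filter (fun v => 0 < v) := by
        rw [show ((k : Int) + 1) = ((k + 1 : Nat) : Int) by push_cast; ring,
          PySem.List.slice_from_natCast]
        have hdl := List.drop_left (l₁ := targets.take (k + 1))
          (l₂ := (targets.drop (k + 1)).filter (fun v => 0 < v))
        rwa [hlen] at hdl
      have hTk : targets.take k ++ (targets.drop (k + 1)).filter (fun v => 0 < v)
          = targets.take k ++ (targets.drop k).filter (fun v => 0 < v) := by
        rw [hdk, List.filter_cons]
        simp [show ¬ (0 : Int) < targets[k] by omega]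
      have hB : ((bs.map (fun b => b.map (sigmaF targets (k + 1)))).map
            (fun b => b.map (fun i => if (k : Int) < i then i - 1 else i)))
          = bs.map (fun b => b.map (sigmaF targets k)) := by
        rw [List.map_map]
        refine List.map_congr_left (fun b hb => ?_)
        show ((b.map (sigmaF targets (k + 1))).map
            (fun i => if (k : Int) < i then i - 1 else i)) = b.map (sigmaF targets k)
        rw [List.map_map]
        refine List.map_congr_left (fun i hi => ?_)
        show (if (k : Int) < sigmaF targets (k + 1) i then sigmaF targets (k + 1) i - 1
          else sigmaF targets (k + 1) i) = sigmaF targets k i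
        exact sigmaF_step_nonpos targets k i hklt hneg (hbs b hb i hi)
      rw [hs1, hs2, hTk, hB]
      exact ih (by omega)
    · rw [if_neg hneg]
      have hTk : targets.take (k + 1) ++ (targets.drop (k + 1)).filter (fun v => 0 < v)
          = targets.take k ++ (targets.drop k).filter (fun v => 0 < v) := by
        rw [List.take_add_one, List.getElem?_eq_getElem hklt, Option.toList_some,
          List.append_assoc, List.singleton_append, hdk, List.filter_cons]
        simp [show (0 : Int) < targets[k] by omega]
      have hB : bs.map (fun b => b.map (sigmaF targets (k + 1)))
          = bs.map (fun b => b.map (sigmaF targets k)) := by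
        refine List.map_congr_left (fun b hb => ?_)
        refine List.map_congr_left (fun i hi => ?_)
        have h0 : 0 ≤ i := ((okB_iff targets i).mp (hbs b hb i hi)).1
        exact sigmaF_step_pos targets k i hklt (by omega) h0
      rw [hTk, hB]
      exact ih (by omega)

theorem compress_zeros_eq (targets : List Int) (buttons : List (List Int)) :
    compress_zeros targets buttons = compress_zeros_alt targets buttons := by
  simp only [compress_zeros, compress_zeros_alt, enum_filterMap_posIdx]
  have hcond : ((posIdx 0 targets).length = targets.length)
      ↔ targets.all (fun v => 0 < v) = true := by
    rw [length_posIdx]; exact filter_pos_length_eq_iff_all targets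
  by_cases hall : targets.all (fun v => 0 < v) = true
  · rw [if_pos (hcond.mpr hall), if_pos hall]
  · rw [if_neg (fun h => hall (hcond.mp h)), if_neg hall]
    have hbs : ∀ b ∈ buttons.map (fun s => s.filter (okB targets)),
        ∀ i ∈ b, okB targets i = true := by
      intro b hb i hi
      obtain ⟨s, -, rfl⟩ := List.mem_map.mp hb
      exact (List.mem_filter.mp hi).2
    have hentry : downForB targets.length
        (targets, (buttons.map (fun s => s.filter (okB targets))).map
          (fun b => b.map (sigmaF targets targets.length)))
        = (targets.filter (fun v => 0 < v),
           (buttons.map (fun s => s.filter (okB targets))).map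
             (fun b => b.map (sigmaF targets 0))) := by
      have := downForB_inv targets targets.length le_rfl
        (buttons.map (fun s => s.filter (okB targets))) hbs
      simpa using this
    have hid : (buttons.map (fun s => s.filter (okB targets))).map
        (fun b => b.map (sigmaF targets targets.length))
        = buttons.map (fun s => s.filter (okB targets)) := by
      have h1 : ∀ b ∈ buttons.map (fun s => s.filter (okB targets)),
          b.map (sigmaF targets targets.length) = b := by
        intro b hb
        have h2 : b.map (sigmaF targets targets.length) = b.map (fun i => i) :=
          List.map_congr_left (fun i hi => sigmaF_top targets i (hbs b hb i hi))
        rw [h2, List.map_id']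
      exact (List.map_congr_left (fun b hb => h1 b hb)).trans (List.map_id' _)
    rw [hid] at hentry
    rw [hentry]
    refine Prod.ext ?_ ?_
    · simpa using posIdx_map_get targets targets 0 rfl
    · simp only [List.map_map]
      refine List.map_congr_left (fun s _ => ?_)
      simp only [Function.comp]
      refine congrArg PySem.Set.ofList ?_
      have hfm : s.filterMap (fun i =>
          ((PySem.List.enumerate (posIdx 0 targets)).foldl
            (fun d p => d.insert p.2 p.1) PySem.Dict.empty).get? i)
          = s.filterMap (fun i =>
              if okB targets i then some (i - nonposCnt (targets.take i.toNat)) else none) :=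
        List.filterMap_congr (fun i _ => dict_eq_rank targets i)
      rw [hfm, filterMap_guard]
      refine List.map_congr_left (fun i hi => ?_)
      have hok := (List.mem_filter.mp hi).2
      exact (sigmaF_zero targets i ((okB_iff targets i).mp hok).1).symm

-- ===== VERDICT (by name: the statement is the Claim_ definition above) =====
theorem compress_zeros_spec : Claim_equal_compress_zeros := by
  intro targets buttons _
  unfold Spec_compress_zeros
  exact compress_zeros_eq targets buttons
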